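-- pv_equiv track=rewrite | github.com/scotjam/ntfs-ext4-bridge | ntfs_bridge/data_runs.py | compress_cluster_list
-- ===== SOURCE A (Python) =====
-- from typing import List, Tuple
--
-- def compress_cluster_list(clusters: List[int]) -> List[Tuple[int, int]]:
--     """
--     Compress a list of cluster numbers into runs.
--
--     Consecutive clusters are combined into single runs.
--
--     Args:
--         clusters: List of cluster numbers (may not be consecutive)
--
--     Returns:
--         List of (length, start_cluster) tuples
--     """
--     if not clusters:
--         return []
--
--     runs = []
--     run_start = clusters[0]
--     run_length = 1
--
--     for i in range(1, len(clusters)):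
--         if clusters[i] == clusters[i - 1] + 1:
--             # Consecutive cluster
--             run_length += 1
--         else:
--             # Gap - save current run and start new
--             runs.append((run_length, run_start))
--             run_start = clusters[i]
--             run_length = 1
--
--     # Don't forget last run
--     runs.append((run_length, run_start))
--
--     return runs
-- ===== SOURCE B (Python) =====
-- from typing import List, Tuple
--
-- def compress_cluster_list(clusters: List[int]) -> List[Tuple[int, int]]:
--     """Compress cluster numbers into (length, start_cluster) runs by divide
--     and conquer: compress each half recursively, then stitch the two run
--     lists, merging the run at the seam when the right half's first run is
--     the immediate continuation of the left half's last run."""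
--     n = len(clusters)
--     if n == 0:
--         return []
--     if n == 1:
--         return [(1, clusters[0])]
--     left = compress_cluster_list(clusters[:n // 2])
--     right = compress_cluster_list(clusters[n // 2:])
--     ll, ls = left[-1]
--     rl, rs = right[0]
--     if rs == ls + ll:
--         return left[:-1] + [(ll + rl, ls)] + right[1:]
--     return left + right
-- ===== Notes on version B (the rewrite author's own statement) =====
-- stated objective: alternative
-- what changed: Replaces A's single left-to-right scan with a run_start/run_length accumulator by divide and conquer: recursively compress the two halves of the list and stitch the results, merging the seam runs when the right half's first run directly continues the left half's last run.
import Mathlib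
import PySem

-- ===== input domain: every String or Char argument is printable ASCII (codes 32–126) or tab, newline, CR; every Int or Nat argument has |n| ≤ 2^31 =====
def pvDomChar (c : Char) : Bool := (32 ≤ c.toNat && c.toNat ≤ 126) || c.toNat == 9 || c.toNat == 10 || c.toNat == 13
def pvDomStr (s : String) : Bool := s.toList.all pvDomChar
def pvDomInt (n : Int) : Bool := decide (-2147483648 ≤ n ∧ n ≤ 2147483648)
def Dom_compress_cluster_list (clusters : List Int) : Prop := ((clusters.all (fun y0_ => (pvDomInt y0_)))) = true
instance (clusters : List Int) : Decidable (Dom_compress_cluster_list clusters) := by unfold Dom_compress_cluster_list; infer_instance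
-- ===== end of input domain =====

-- B replaces A's single accumulator scan by divide and conquer: compress the two
-- halves recursively and merge the run at the seam; an alternative decomposition,
-- not claimed faster.

-- ===== PORT A =====
-- for i in range(1, len(clusters)) with state (runs, run_start, run_length)
def compress_cluster_list (clusters : List Int) : List (Int × Int) :=
  match clusters with
  | [] => []
  | c0 :: _ =>
    let st := (PySem.List.pyRange 1 (PySem.List.len clusters) 1).foldl
      (fun (st : List (Int × Int) × Int × Int) i =>
        if PySem.List.pyGetD clusters i 0 = PySem.List.pyGetD clusters (i - 1) 0 + 1 then
          (st.1, st.2.1, st.2.2 + 1)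
        else
          (st.1 ++ [(st.2.2, st.2.1)], PySem.List.pyGetD clusters i 0, 1))
      ([], c0, 1)
    st.1 ++ [(st.2.2, st.2.1)]

-- ===== PORT B =====
-- divide and conquer as in Source B; left/right are nonempty on every recursive call
-- (every call is on a list of length ≥ 1 and returns a nonempty list), so the
-- (0, 0) defaults of left[-1] / right[0] are never read
def compress_cluster_list_alt (clusters : List Int) : List (Int × Int) :=
  let n : Int := PySem.List.len clusters
  if h0 : n = 0 then []
  else if h1 : n = 1 then [(1, PySem.List.pyGetD clusters 0 0)]
  else
    let left := compress_cluster_list_alt (PySem.List.slice clusters none (some (PySem.Int.floordiv n 2)))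
    let right := compress_cluster_list_alt (PySem.List.slice clusters (some (PySem.Int.floordiv n 2)) none)
    let lp := PySem.List.pyGetD left (-1) ((0 : Int), (0 : Int))
    let rp := PySem.List.pyGetD right 0 ((0 : Int), (0 : Int))
    if rp.2 = lp.2 + lp.1 then
      PySem.List.slice left none (some (-1)) ++ [(lp.1 + rp.1, lp.2)] ++ PySem.List.slice right (some 1) none
    else left ++ right
termination_by clusters.length
decreasing_by
  · simp only [n, PySem.List.len_eq] at h0 h1 ⊢
    rw [show PySem.Int.floordiv (clusters.length : Int) 2 = ((clusters.length / 2 : Nat) : Int) from by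
          rw [PySem.Int.floordiv_eq_ediv_of_pos (by omega)]; omega,
        PySem.List.slice_to_natCast]
    simp only [List.length_take]
    omega
  · simp only [n, PySem.List.len_eq] at h0 h1 ⊢
    rw [show PySem.Int.floordiv (clusters.length : Int) 2 = ((clusters.length / 2 : Nat) : Int) from by
          rw [PySem.Int.floordiv_eq_ediv_of_pos (by omega)]; omega,
        PySem.List.slice_from_natCast]
    simp only [List.length_drop]
    omega

-- ===== PRECONDITION & SPEC =====
def Spec_compress_cluster_list (clusters : List Int) (out : List (Int × Int)) : Prop := out = compress_cluster_list_alt clusters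
instance (clusters : List Int) (out : List (Int × Int)) : Decidable (Spec_compress_cluster_list clusters out) := by unfold Spec_compress_cluster_list; infer_instance

-- ===== CLAIM (what is proved, stated in full; the proofs are below) =====
def Claim_equal_compress_cluster_list : Prop := ∀ (clusters : List Int), Dom_compress_cluster_list clusters → Spec_compress_cluster_list clusters (compress_cluster_list clusters)

-- ===== LEMMAS AND PROOFS =====

-- Common characterisation used by both directions: a span scan emitting one
-- maximal consecutive run per step.
def takeRun (prev : Int) (rest : List Int) (acc : Int) : Int × List Int :=
  match rest with
  | [] => (acc, [])
  | x :: xs => if x = prev + 1 then takeRun x xs (acc + 1) else (acc, x :: xs)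

theorem takeRun_snd_length_le (rest : List Int) (prev acc : Int) :
    (takeRun prev rest acc).2.length ≤ rest.length := by
  induction rest generalizing prev acc with
  | nil => simp [takeRun]
  | cons x xs ih =>
      simp only [takeRun]
      split
      · exact Nat.le_succ_of_le (ih x (acc + 1))
      · simp

def spanRuns : List Int → List (Int × Int)
  | [] => []
  | c :: rest =>
    let r := takeRun c rest 1
    (r.1, c) :: spanRuns r.2
termination_by l => l.length
decreasing_by
  have := takeRun_snd_length_le rest c 1
  simp only [List.length_cons]
  omega

-- ---------- A = spanRuns ----------

-- A's loop step, on the adjacent pair (prev, cur) instead of indices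
def stepPair (st : List (Int × Int) × Int × Int) (prev cur : Int) :
    List (Int × Int) × Int × Int :=
  if cur = prev + 1 then (st.1, st.2.1, st.2.2 + 1)
  else (st.1 ++ [(st.2.2, st.2.1)], cur, 1)

-- walk over the adjacent pairs of prev :: rest
def pairFold {S : Type} (g : S → Int → Int → S) : Int → List Int → S → S
  | _, [], s => s
  | prev, x :: xs, s => pairFold g x xs (g s prev x)

theorem pyGetD_cons_of_pos (c : Int) (l : List Int) (i : Int)
    (h1 : 1 ≤ i) (h2 : i < (l.length : Int) + 1) :
    PySem.List.pyGetD (c :: l) i 0 = PySem.List.pyGetD l (i - 1) 0 := by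
  rw [PySem.List.pyGetD_eq_getElem (c :: l) 0 (by omega)
        (by simp only [List.length_cons]; push_cast; omega),
      PySem.List.pyGetD_eq_getElem l 0 (by omega) (by omega)]
  have h : i.toNat = (i - 1).toNat + 1 := by omega
  simp only [h, List.getElem_cons_succ]

theorem foldl_pyRange_shift {S : Type} (g : S → Int → S) (a b : Int) (s : S) :
    (PySem.List.pyRange (a + 1) (b + 1) 1).foldl g s
      = (PySem.List.pyRange a b 1).foldl (fun st i => g st (i + 1)) s := by
  rw [PySem.List.pyRange_one (a + 1) (b + 1), PySem.List.pyRange_one a b]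
  have h : b + 1 - (a + 1) = b - a := by ring
  rw [h]
  simp only [List.foldl_map]
  have h2 : (fun (st : S) (k : Nat) => g st (a + 1 + (k : Int)))
      = fun (st : S) (k : Nat) => g st (a + (k : Int) + 1) := by
    funext st k; ring_nf
  rw [h2]

theorem idx_pairs {S : Type} (g : S → Int → Int → S) :
    ∀ (rest : List Int) (c : Int) (s : S),
    (PySem.List.pyRange 1 ((rest.length : Int) + 1) 1).foldl
        (fun st i => g st (PySem.List.pyGetD (c :: rest) (i - 1) 0)
                          (PySem.List.pyGetD (c :: rest) i 0)) s
      = pairFold g c rest s := by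
  intro rest
  induction rest with
  | nil => intro c s; rw [PySem.List.pyRange_one_eq_nil (by norm_num)]; rfl
  | cons x xs ih =>
      intro c s
      rw [PySem.List.pyRange_one_cons (by simp only [List.length_cons]; push_cast; omega)]
      simp only [List.foldl_cons]
      have h0 : PySem.List.pyGetD (c :: x :: xs) (1 - 1) 0 = c := by
        norm_num [PySem.List.pyGetD_zero_cons]
      have h1 : PySem.List.pyGetD (c :: x :: xs) 1 0 = x := by
        rw [pyGetD_cons_of_pos c (x :: xs) 1 (by omega)
              (by simp only [List.length_cons]; push_cast; omega)]
        norm_num [PySem.List.pyGetD_zero_cons]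
      rw [h0, h1]
      have hrange2 : ((x :: xs).length : Int) + 1 = ((xs.length : Int) + 1) + 1 := by
        simp only [List.length_cons]; push_cast; ring
      rw [show (1 : Int) + 1 = (1 : Int) + 1 from rfl, hrange2,
          foldl_pyRange_shift (fun st i => g st (PySem.List.pyGetD (c :: x :: xs) (i - 1) 0)
            (PySem.List.pyGetD (c :: x :: xs) i 0)) 1 ((xs.length : Int) + 1) (g s c x)]
      have hcong := PySem.List.foldl_congr_mem
        (PySem.List.pyRange 1 ((xs.length : Int) + 1) 1)
        (fun st i => g st (PySem.List.pyGetD (c :: x :: xs) (i + 1 - 1) 0)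
                          (PySem.List.pyGetD (c :: x :: xs) (i + 1) 0))
        (fun st i => g st (PySem.List.pyGetD (x :: xs) (i - 1) 0)
                          (PySem.List.pyGetD (x :: xs) i 0))
        (g s c x)
        (by
          intro st i hi
          rw [PySem.List.mem_pyRange_one] at hi
          dsimp only
          have e1 : i + 1 - 1 = i := by ring
          rw [e1, pyGetD_cons_of_pos c (x :: xs) i (by omega)
                (by simp only [List.length_cons]; push_cast; omega),
              pyGetD_cons_of_pos c (x :: xs) (i + 1) (by omega)
                (by simp only [List.length_cons]; push_cast; omega)]
          have e2 : i + 1 - 1 = i := by ring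
          rw [e2])
      rw [hcong, ih x (g s c x)]
      rfl

theorem pairFold_stepPair_span :
    ∀ (rest : List Int) (prev rs rl : Int) (runs : List (Int × Int)),
    (pairFold stepPair prev rest (runs, rs, rl)).1
        ++ [((pairFold stepPair prev rest (runs, rs, rl)).2.2,
             (pairFold stepPair prev rest (runs, rs, rl)).2.1)]
      = runs ++ ((takeRun prev rest rl).1, rs)
          :: spanRuns (takeRun prev rest rl).2 := by
  intro rest
  induction rest with
  | nil => intro prev rs rl runs; simp [pairFold, takeRun, spanRuns]
  | cons x xs ih =>
      intro prev rs rl runs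
      by_cases h : x = prev + 1
      · simp only [pairFold, takeRun, stepPair, if_pos h]
        exact ih x rs (rl + 1) runs
      · simp only [pairFold, takeRun, stepPair, if_neg h]
        rw [ih x x 1 (runs ++ [(rl, rs)])]
        rw [spanRuns]
        simp

-- idx_pairs, restated in the exact shape of A's loop body
theorem idx_pairs_step (rest : List Int) (c : Int)
    (s : List (Int × Int) × Int × Int) :
    (PySem.List.pyRange 1 ((rest.length : Int) + 1) 1).foldl
      (fun (st : List (Int × Int) × Int × Int) i =>
        if PySem.List.pyGetD (c :: rest) i 0
            = PySem.List.pyGetD (c :: rest) (i - 1) 0 + 1 then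
          (st.1, st.2.1, st.2.2 + 1)
        else
          (st.1 ++ [(st.2.2, st.2.1)], PySem.List.pyGetD (c :: rest) i 0, 1)) s
      = pairFold stepPair c rest s :=
  idx_pairs stepPair rest c s

theorem a_eq_spanRuns (clusters : List Int) :
    compress_cluster_list clusters = spanRuns clusters := by
  cases clusters with
  | nil => simp [compress_cluster_list, spanRuns]
  | cons c rest =>
      simp only [compress_cluster_list, PySem.List.len_eq, List.length_cons]
      have hlen : (((rest.length + 1 : Nat) : Int)) = (rest.length : Int) + 1 := by
        push_cast; ring
      rw [hlen, idx_pairs_step rest c ([], c, 1),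
          pairFold_stepPair_span rest c c 1 [],
          spanRuns]
      simp

-- ---------- B = spanRuns ----------

theorem takeRun_acc (rest : List Int) :
    ∀ (p a : Int), takeRun p rest a
      = ((takeRun p rest 0).1 + a, (takeRun p rest 0).2) := by
  induction rest with
  | nil => intro p a; simp [takeRun]
  | cons x xs ih =>
      intro p a
      by_cases h : x = p + 1
      · simp only [takeRun, if_pos h]
        rw [ih x (a + 1), ih x (0 + 1)]
        dsimp only
        simp only [Prod.mk.injEq]
        exact ⟨by ring, trivial⟩
      · simp [takeRun, if_neg h]

-- scanning past an append: either the run ends inside `rest`, or it reaches the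
-- end of `rest` (last scanned value is p + count) and continues into `ys`
theorem takeRun_append (rest : List Int) :
    ∀ (p a : Int) (ys : List Int),
    takeRun p (rest ++ ys) a
      = if (takeRun p rest a).2 = []
        then takeRun (p + (takeRun p rest 0).1) ys (takeRun p rest a).1
        else ((takeRun p rest a).1, (takeRun p rest a).2 ++ ys) := by
  induction rest with
  | nil => intro p a ys; simp [takeRun]
  | cons x xs ih =>
      intro p a ys
      by_cases h : x = p + 1
      · simp only [List.cons_append, takeRun, if_pos h]
        rw [ih x (a + 1) ys]
        have e3 : p + (takeRun x xs (0 + 1)).1 = x + (takeRun x xs 0).1 := by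
          rw [takeRun_acc xs x (0 + 1)]; dsimp only; omega
        rw [e3]
      · simp [takeRun, if_neg h]

theorem spanRuns_ne_nil (xs : List Int) (h : xs ≠ []) : spanRuns xs ≠ [] := by
  cases xs with
  | nil => exact absurd rfl h
  | cons c rest => rw [spanRuns]; simp

-- the seam merge, on run lists
def mergeRuns (l r : List (Int × Int)) : List (Int × Int) :=
  match l.getLast?, r with
  | some (ll, ls), (rl, rs) :: r' =>
      if rs = ls + ll then l.dropLast ++ (ll + rl, ls) :: r' else l ++ r
  | _, _ => l ++ r

theorem mergeRuns_cons (p : Int × Int) (l r : List (Int × Int)) (h : l ≠ []) :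
    mergeRuns (p :: l) r = p :: mergeRuns l r := by
  cases l with
  | nil => exact absurd rfl h
  | cons a as =>
    obtain ⟨q, hq⟩ : ∃ q, (a :: as).getLast? = some q :=
      ⟨(a :: as).getLast (by simp), List.getLast?_eq_some_getLast (by simp)⟩
    have hlast : (p :: a :: as).getLast? = some q := by
      rw [List.getLast?_cons_cons, hq]
    obtain ⟨ll, ls⟩ := q
    cases r with
    | nil => simp [mergeRuns, hlast, hq]
    | cons rp r' =>
        obtain ⟨rl, rs⟩ := rp
        simp only [mergeRuns, hlast, hq]
        by_cases hcond : rs = ls + ll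
        · simp only [if_pos hcond,
            List.dropLast_cons_of_ne_nil (show (a :: as) ≠ [] by simp), List.cons_append]
        · simp [if_neg hcond]

theorem spanRuns_append : ∀ (n : Nat) (xs ys : List Int), xs.length ≤ n →
    xs ≠ [] → ys ≠ [] →
    spanRuns (xs ++ ys) = mergeRuns (spanRuns xs) (spanRuns ys) := by
  intro n
  induction n with
  | zero => intro xs ys h hxs _; cases xs <;> simp_all
  | succ n ih =>
      intro xs ys h hxs hys
      cases xs with
      | nil => exact absurd rfl hxs
      | cons c rest =>
        cases ys with
        | nil => exact absurd rfl hys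
        | cons y ys' =>
          rw [List.cons_append, spanRuns]
          rw [takeRun_append rest c 1 (y :: ys')]
          by_cases hnil : (takeRun c rest 1).2 = []
          · -- the first run swallows all of rest and may continue into ys
            rw [if_pos hnil]
            have hspanx : spanRuns (c :: rest)
                = [((takeRun c rest 1).1, c)] := by
              rw [spanRuns]; simp [hnil, spanRuns]
            set k := (takeRun c rest 1).1 with hk
            set k0 := (takeRun c rest 0).1 with hk0
            have hkk0 : k = k0 + 1 := by
              rw [hk, hk0, takeRun_acc rest c 1]
            by_cases hc : y = c + k0 + 1
            · have hstep : takeRun (c + k0) (y :: ys') k = takeRun y ys' (k + 1) := by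
                simp [takeRun, show y = c + k0 + 1 from hc]
              rw [hstep]
              rw [takeRun_acc ys' y (k + 1)]
              have h1 : takeRun y ys' 1 = ((takeRun y ys' 0).1 + 1, (takeRun y ys' 0).2) :=
                takeRun_acc ys' y 1
              rw [hspanx, spanRuns]
              simp only [mergeRuns, List.getLast?_singleton]
              have hcond : y = c + k := by omega
              rw [if_pos hcond, h1]
              dsimp only
              simp only [List.dropLast_singleton, List.nil_append, Prod.mk.injEq,
                List.cons.injEq]
              refine ⟨⟨by ring, ?_⟩, ?_⟩ <;> trivial
            · have hstep : takeRun (c + k0) (y :: ys') k = (k, y :: ys') := by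
                simp [takeRun, show ¬ y = c + k0 + 1 from hc]
              rw [hstep, hspanx]
              rw [spanRuns]
              simp only [mergeRuns, List.getLast?_singleton]
              rw [if_neg (by omega)]
              simp
          · -- the first run ends inside rest
            rw [if_neg hnil]
            have hlen2 : (takeRun c rest 1).2.length ≤ n := by
              have := takeRun_snd_length_le rest c 1
              simp only [List.length_cons] at h
              omega
            have ihx := ih (takeRun c rest 1).2 (y :: ys') hlen2 hnil (by simp)
            dsimp only
            rw [ihx]
            rw [show spanRuns (c :: rest)
                  = ((takeRun c rest 1).1, c) :: spanRuns (takeRun c rest 1).2 from by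
                rw [spanRuns]]
            rw [mergeRuns_cons _ _ _ (spanRuns_ne_nil _ hnil)]

-- the port's inline seam code equals mergeRuns on nonempty run lists
theorem port_merge_eq (l r : List (Int × Int)) (hl : l ≠ []) (hr : r ≠ []) :
    (if (PySem.List.pyGetD r 0 ((0 : Int), (0 : Int))).2
          = (PySem.List.pyGetD l (-1) ((0 : Int), (0 : Int))).2
            + (PySem.List.pyGetD l (-1) ((0 : Int), (0 : Int))).1 then
        PySem.List.slice l none (some (-1))
          ++ [((PySem.List.pyGetD l (-1) ((0 : Int), (0 : Int))).1
                + (PySem.List.pyGetD r 0 ((0 : Int), (0 : Int))).1,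
               (PySem.List.pyGetD l (-1) ((0 : Int), (0 : Int))).2)]
          ++ PySem.List.slice r (some 1) none
      else l ++ r)
      = mergeRuns l r := by
  cases r with
  | nil => exact absurd rfl hr
  | cons rp r' =>
      have hlast : PySem.List.pyGetD l (-1) ((0 : Int), (0 : Int)) = l.getLast hl :=
        PySem.List.pyGetD_neg_one l _ hl
      have hq : l.getLast? = some (l.getLast hl) := List.getLast?_eq_some_getLast hl
      rcases e : l.getLast hl with ⟨ll, ls⟩
      rw [e] at hlast hq
      have hhead : PySem.List.pyGetD (rp :: r') 0 ((0 : Int), (0 : Int)) = rp :=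
        PySem.List.pyGetD_zero_cons rp r' _
      obtain ⟨rl, rs⟩ := rp
      rw [hlast, hhead, PySem.List.slice_to_neg_one, PySem.List.slice_from_one]
      simp only [mergeRuns, hq, List.tail_cons]
      by_cases hcond : rs = ls + ll
      · simp [if_pos hcond]
      · simp [if_neg hcond]

theorem alt_eq_spanRuns : ∀ (n : Nat) (xs : List Int), xs.length ≤ n →
    compress_cluster_list_alt xs = spanRuns xs := by
  intro n
  induction n with
  | zero =>
      intro xs h
      have : xs = [] := List.length_eq_zero_iff.mp (Nat.le_zero.mp h)
      subst this
      rw [compress_cluster_list_alt]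
      simp [spanRuns]
  | succ n ih =>
      intro xs h
      rw [compress_cluster_list_alt]
      simp only [PySem.List.len_eq]
      by_cases h0 : (xs.length : Int) = 0
      · rw [dif_pos h0]
        have : xs = [] := List.length_eq_zero_iff.mp (by exact_mod_cast h0)
        simp [this, spanRuns]
      · rw [dif_neg h0]
        by_cases h1 : (xs.length : Int) = 1
        · rw [dif_pos h1]
          have hx : ∃ a, xs = [a] := List.length_eq_one_iff.mp (by exact_mod_cast h1)
          obtain ⟨a, rfl⟩ := hx
          rw [spanRuns]
          simp [takeRun, PySem.List.pyGetD_zero_cons, spanRuns]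
        · rw [dif_neg h1]
          have hlen2 : 2 ≤ xs.length := by omega
          have hdiv : PySem.Int.floordiv (xs.length : Int) 2
              = ((xs.length / 2 : Nat) : Int) := by
            rw [PySem.Int.floordiv_eq_ediv_of_pos (by omega)]; omega
          rw [hdiv, PySem.List.slice_to_natCast, PySem.List.slice_from_natCast]
          have htl : (xs.take (xs.length / 2)).length = xs.length / 2 := by
            simp [List.length_take]; omega
          have hdl : (xs.drop (xs.length / 2)).length = xs.length - xs.length / 2 := by
            simp [List.length_drop]
          have htn : xs.take (xs.length / 2) ≠ [] := by
            intro hc; rw [← List.length_eq_zero_iff] at hc; omega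
          have hdn : xs.drop (xs.length / 2) ≠ [] := by
            intro hc; rw [← List.length_eq_zero_iff] at hc; omega
          rw [ih _ (by omega), ih _ (by omega)]
          have := port_merge_eq (spanRuns (xs.take (xs.length / 2)))
            (spanRuns (xs.drop (xs.length / 2)))
            (spanRuns_ne_nil _ htn) (spanRuns_ne_nil _ hdn)
          simp only at this ⊢
          rw [this, ← spanRuns_append xs.length _ _ (by omega) htn hdn,
              List.take_append_drop]

-- ===== VERDICT (by name: the statement is the Claim_ definition above) =====
theorem compress_cluster_list_spec : Claim_equal_compress_cluster_list := by
  intro clusters _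
  unfold Spec_compress_cluster_list
  rw [a_eq_spanRuns, alt_eq_spanRuns clusters.length clusters le_rfl]
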